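/- GENERATED by tools/from_farm_form.py from prooffarm-gif/accepted/DGifGetImageDesc.2/Lemmas.lean (a worked proof of the farm's unit `DGifGetImageDesc.2`,
   accepted by the verdict) — do not edit. -/
import Gif.Spec.Units.DGifGetImageDesc_2
import Gif.Spec.AllSegs

/-!
  Lemmas for the unit `DGifGetImageDesc.2` (dgif_lib.c:444-452: `if (SavedImages) reallocarray(SavedImages, ImageCount + 1, 56)`,
  the NULL arm, the store of the new pointer). The segment is walked in pieces that meet at the return address of the call
  (1094EAH, `ret7`), with a private assertion there; the forest decides the first branch BEFORE the walk.

      seg2_carry        `At` through a footprint of own stack + `[800000H, 1000020H)` (slots, return address, `rem`, `same`)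
      seg2_loose_above, seg2_windows
                        the eight windows the segment writes are loose for the OLD heap and forest, or the field `gif.SavedImages`
      seg2_shape        `Shape` of the forest with the array at `q`, `cap = length + 1` (`Shape.set_saved` + `SavedAt.moved`)
      seg2_lz           `LZOK` through the same windows
      seg2_owns_inplace, seg2_owns_moved
                        what is owned after `Hc.resize` / after `(Hc.push …).release` (`Owns.resize_head`, `.push_cons`, `.release`)
      seg2_none         1094B5H … 1095E6H for `Fc.saved = none`: `NoArray`
      seg2_rsi          `lea esi, [rax+1] ; movsxd rsi, esi` as a number
      seg2_AtRet7       the assertion at `ret7`: the entry's `Mid` (at `v`), the footprint, the three outcomes of `ReallocPost`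
      seg2_call         1094B5H … the call … 1094EAH for `Fc.saved = some sv`
      seg2_tail_grow    1094EAH … 109503H for a result `q ≠ 0` (in place and moved alike): `Grown`
      seg2_tail_fail    1094EAH … 1095D1H … 10949AH for the NULL result: `Done`
      seg2_tail         the case analysis over `r16 m ≤ c` / `Hc.Fits (r16 m)` that picks the tail
-/

open X86 X86.User Asan ProgX.Base ProgX.Base.Spec Gif.Spec

set_option maxRecDepth 4000
set_option maxHeartbeats 4000000

namespace Gif.Spec.DGifGetImageDesc_2

/-- **THE ASSERTION `At` THROUGH A FOOTPRINT OF THE SEGMENT**: every window written since `v` lies in the function's own stack below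
the body's stack pointer, or in the contract's window `[800000H, 1000020H)` (the heap's region and the shadow). The saved registers,
the return address, the footprint since the entry and the reader's measure are carried; the heap's invariant and the state
invariant (for the new heap and forest) are the caller's obligations. -/
theorem seg2_carry (Lay : Layout) (hLay : Lay.hi = 0x1000000) {cut cut' : Word} {H : Heap} {rest : List Obj} {frames : List (Nat × FrameLayout)} {F : Forest} {R : Rd}
    {Hc Hc' : Heap} {Fc Fc' : Forest} {u₀ e : State} {ret : Word} {v s : State} {ws : List Span}
    (hat : DGifGetImageDesc.At cut H rest frames F R Hc Fc u₀ e ret v)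
    (hs : Mem.SameExcept ws v.mem s.mem)
    (hws : ∀ w, w ∈ ws → ((e.reg .rsp).toNat - 496 ≤ w.lo ∧ w.hi ≤ (e.reg .rsp).toNat - 40) ∨
      (0x800000 ≤ w.lo ∧ w.hi ≤ 0x1000020))
    (hrip : s.rip = cut') (hrsp : s.reg .rsp = e.reg .rsp - 40) (hrbx : s.reg .rbx = v.reg .rbx)
    (hr14 : s.reg .r14 = v.reg .r14) (hr15 : s.reg .r15 = v.reg .r15)
    (hinv : HeapInv Hc' rest frames ((e.reg .rsp).toNat - 40) s.mem) (hreg : SameRegion H Hc')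
    (hfor : F.SameButIcmSaved Fc') (hok : GifOK Hc' Fc' R s.mem)
    (hcode : (conv u₀).code.In s.mem) (habi : (conv u₀).inv s) :
    DGifGetImageDesc.At cut' H rest frames F R Hc' Fc' u₀ e ret s := by
  have he := hat.entry
  v_entry he
  have hcur := hat.pre.1.ctx.cursor_range hat.pre.1.heap.inv.shadow
  have hlt := (e.reg .rsp).toNat_lt
  clear he_align
  -- a slot `[rsp − off, rsp − off + k)` with `off ≤ 32` is missed by every window
  have hslot : ∀ (off k x : Nat), off ≤ 32 → k ≤ off → v.mem.readLE (e.reg .rsp - UInt64.ofNat off) k = x →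
      s.mem.readLE (e.reg .rsp - UInt64.ofNat off) k = x := by
    intro off k x hoff hk hx
    apply slot_sameExcept hs (e.reg .rsp) off k x (by omega) hk hx
    intro w hw
    rcases hws w hw with ⟨h1, h2⟩ | ⟨h1, h2⟩
    · right
      omega
    · left
      omega
  refine {
    entry := hat.entry
    pre := hat.pre
    rip := hrip
    rsp := hrsp
    rbx := hrbx.trans hat.rbx
    r14 := hr14.trans hat.r14
    r15 := hr15.trans hat.r15
    slot_r13 := hslot 8 8 _ (by omega) (by omega) hat.slot_r13
    slot_r12 := hslot 16 8 _ (by omega) (by omega) hat.slot_r12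
    slot_rbp := hslot 24 8 _ (by omega) (by omega) hat.slot_rbp
    slot_rbx := hslot 32 8 _ (by omega) (by omega) hat.slot_rbx
    slot_ra := ?_
    inv := hinv
    region := hreg
    forest := hfor
    ok := hok
    rem := ?_
    same := ?_
    code := hcode
    abi := habi
  }
  · -- the return address
    rw [hs.readLE (e.reg .rsp) 8 (by omega) ?_]
    · exact hat.slot_ra
    · intro w hw
      rcases hws w hw with ⟨h1, h2⟩ | ⟨h1, h2⟩
      · right
        omega
      · left
        omega
  · -- the reader's measure: the cursor lies above the return address, below the heap
    have e1 : rem R s.mem = rem R v.mem := by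
      apply rem_sameExcept hs (by omega)
      intro w hw
      rcases hws w hw with ⟨h1, h2⟩ | ⟨h1, h2⟩
      · left
        omega
      · right
        omega
    rw [e1]
    exact hat.rem
  · -- the footprint since the entry
    apply hat.same.step_same hs
    intro w hw a ha1 ha2
    rcases hws w hw with ⟨h1, h2⟩ | ⟨h1, h2⟩
    · refine ⟨_, List.mem_cons_self, ?_, ?_⟩
      · show (e.reg .rsp).toNat - 496 ≤ a
        omega
      · show a < (e.reg .rsp).toNat
        omega
    · refine ⟨_, List.mem_cons_of_mem _ List.mem_cons_self, ?_, ?_⟩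
      · show 0x800000 ≤ a
        omega
      · show a < 0x1000020
        omega

/-- **A window at or above the next chunk's header** (`[next − 32, …)`: the header and the bytes of the object a moving `realloc`
allocates) **is loose**: every object of the heap, live or freed, ends 64 bytes below `next`. No upper bound is asked (the window
is in the callee's footprint also when the allocation does not fit). -/
theorem seg2_loose_above {H : Heap} {F : Forest} {R : Rd} {mem : Mem} {w : Span} (hok : HeapOK H mem)
    (hbase : H.base = 0x800000) (hcur : 0x700000 ≤ R.cur ∧ R.cur + 16 ≤ 0x800000) (h : H.next - 32 ≤ w.lo) : Loose H F R w := by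
  have hnext := Heap.next_def H
  refine Or.inl ⟨?_, ?_, ?_⟩
  · intro x hx
    have := hok.next_above hx
    right
    omega
  · right
    omega
  · right
    omega

/-- **THE WINDOWS WRITTEN BY THE SEGMENT ARE LOOSE FOR THE OLD HEAP AND FOREST, OR THE FIELD `gif.SavedImages`**: the own stack below
the cursor, the heap's control cell, the header and the bytes of the next chunk, the header of the old array, two shadow windows. -/
theorem seg2_windows {H : Heap} {F : Forest} {R : Rd} {mem : Mem} {sv : Saved} {c top m : Nat} (hok : HeapOK H mem)
    (hbase : H.base = 0x800000) (hcur : 0x700000 ≤ R.cur ∧ R.cur + 16 ≤ 0x800000) (htop1 : 0x700000 + 496 ≤ top)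
    (htop2 : top ≤ R.cur) (hlc : H.LiveCap sv.arr (56 * sv.cap) c) :
    ∀ w, w ∈ [⟨top - 496, top - 40⟩, ⟨0x800000, 0x800008⟩, ⟨H.next - 32, H.next - 8⟩, shadowSpan H.next (H.next + m),
      ⟨H.next, H.next + m⟩, ⟨sv.arr - 32, sv.arr - 16⟩, shadowSpan sv.arr (sv.arr + c), (⟨F.gif + 72, F.gif + 80⟩ : Span)] →
      Loose H F R w ∨ (F.gif + 72 ≤ w.lo ∧ w.hi ≤ F.gif + 80) := by
  intro w hw
  simp only [List.mem_cons, List.not_mem_nil, or_false] at hw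
  rcases hw with rfl | rfl | rfl | rfl | rfl | rfl | rfl | rfl
  · left
    apply Loose.stack hok
    · show 0x700000 ≤ top - 496
      omega
    · show top - 40 ≤ 0x800000
      omega
    · show top - 40 ≤ R.cur
      omega
  · left
    apply Loose.cell hok hcur
    · show H.base ≤ 0x800000
      omega
    · show 0x800008 ≤ H.base + 32
      omega
  · left
    exact seg2_loose_above hok hbase hcur (Nat.le_refl _)
  · left
    apply Loose.shadow hok hcur.2
    unfold shadowSpan
    show 0xC00000 ≤ 0xC00000 + H.next / 8
    omega
  · left
    apply seg2_loose_above hok hbase hcur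
    show H.next - 32 ≤ H.next
    omega
  · left
    apply Loose.header hok hcur hlc
    · show sv.arr - 32 ≤ sv.arr - 32
      omega
    · show sv.arr - 16 ≤ sv.arr
      omega
  · left
    apply Loose.shadow hok hcur.2
    unfold shadowSpan
    show 0xC00000 ≤ 0xC00000 + sv.arr / 8
    omega
  · right
    exact ⟨Nat.le_refl _, Nat.le_refl _⟩

/-- **THE SHAPE AFTER THE ARRAY GREW** (in place: `q = sv.arr`; moved: `q = H.next`): the memory changed in the windows of
`seg2_windows` only, the field `gif.SavedImages` holds `q`, and the counted slots at `q` have the bytes the old ones had. The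
forest has the array at `q` with room for exactly one more slot. (`Shape.set_saved` with `SavedAt.moved`.) -/
theorem seg2_shape {H : Heap} {F : Forest} {R : Rd} {mem mem' : Mem} {sv : Saved} {c top m q : Nat}
    (hgo : GifOK H F R mem) (hok : HeapOK H mem) (hbase : H.base = 0x800000)
    (hcur : 0x700000 ≤ R.cur ∧ R.cur + 16 ≤ 0x800000) (htop1 : 0x700000 + 496 ≤ top) (htop2 : top ≤ R.cur)
    (hsome : F.saved = some sv) (hlc : H.LiveCap sv.arr (56 * sv.cap) c)
    (hs : Mem.SameExcept [⟨top - 496, top - 40⟩, ⟨0x800000, 0x800008⟩, ⟨H.next - 32, H.next - 8⟩,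
      shadowSpan H.next (H.next + m), ⟨H.next, H.next + m⟩, ⟨sv.arr - 32, sv.arr - 16⟩, shadowSpan sv.arr (sv.arr + c),
      (⟨F.gif + 72, F.gif + 80⟩ : Span)] mem mem')
    (hq : GifFileType.SavedImages mem' F.gif = q) (hq2 : q + 56 * sv.imgs.length < 2 ^ 64)
    (hcopy : ∀ i, i < 56 * sv.imgs.length → rd mem' (q + i) 1 = rd mem (sv.arr + i) 1) :
    Shape ({ F with saved := some { sv with arr := q, cap := sv.imgs.length + 1 } } : Forest) R mem' := by
  have hp := hgo.owns.placed hok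
  have hl := seg2_windows (F := F) (m := m) hok hbase hcur htop1 htop2 hlc
  have G := carry_Geo.intro hgo.shape hp hok hcur
  obtain ⟨xg, hxg, ebg, hcg⟩ := G.gifObj
  have hgin := G.inData xg hxg
  have hsv := hgo.shape.saved
  rw [hsome] at hsv
  have hain := hok.obj_inside hlc
  simp only at hain
  have hsl := hsv.2.2.1
  apply hgo.shape.set_saved hp hok hcur hs
  · intro w hw
    rcases hl w hw with h | h
    · exact Or.inl h
    · exact Or.inr (Or.inl h)
  · -- the count field was not written
    have hcnt : GifFileType.ImageCount mem' F.gif = GifFileType.ImageCount mem F.gif := by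
      simp only [gfield]
      apply hs.rd _ _ (by omega)
      intro w hw
      rcases hl w hw with h | h
      · have hoff : carry_Off F R True True True True True w := carry_Off.of_loose G h
        have := hoff.cntF trivial
        omega
      · omega
    rw [hq, hcnt]
    apply hsv.moved q (sv.imgs.length + 1) hcopy
    · -- the structural parts of the counted images are other objects
      intro o ho
      have ho' : o ∈ Saved.structs F.saved := by
        rw [hsome]
        exact List.mem_cons_of_mem _ ho
      apply hs.eqOn
      intro w hw
      rcases hl w hw with h | h
      · have hoff : carry_Off F R True True True True True w := carry_Off.of_loose G h
        have := hoff.savS trivial o ho'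
        omega
      · have hne := (G.struct_ne o (carry_mem_structs_saved ho')).1
        have hin := (G.in_obj hxg (w := w) (by omega) (by omega)).2.2.1 o (carry_mem_structs_saved ho') (by
          rw [ebg]
          exact hne)
        omega
    · intro o ho
      have ho' : o ∈ Saved.structs F.saved := by
        rw [hsome]
        exact List.mem_cons_of_mem _ ho
      obtain ⟨x, hx, e1, e2⟩ := G.structObj o (carry_mem_structs_saved ho')
      have := G.inData x hx
      omega
    · omega
    · omega
    · omega
    · exact hq2

/-- **THE LZW FIELD RANGES THROUGH THE SEGMENT'S WINDOWS**: none of them meets pv (another object of the heap than the array, gif and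
the next chunk; below the shadow, above the stack). -/
theorem seg2_lz {H : Heap} {F : Forest} {R : Rd} {mem mem' : Mem} {sv : Saved} {c top m : Nat}
    (hgo : GifOK H F R mem) (hok : HeapOK H mem) (hbase : H.base = 0x800000)
    (hcur : 0x700000 ≤ R.cur ∧ R.cur + 16 ≤ 0x800000) (htop2 : top ≤ R.cur)
    (hsome : F.saved = some sv) (hlc : H.LiveCap sv.arr (56 * sv.cap) c)
    (hs : Mem.SameExcept [⟨top - 496, top - 40⟩, ⟨0x800000, 0x800008⟩, ⟨H.next - 32, H.next - 8⟩,
      shadowSpan H.next (H.next + m), ⟨H.next, H.next + m⟩, ⟨sv.arr - 32, sv.arr - 16⟩, shadowSpan sv.arr (sv.arr + c),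
      (⟨F.gif + 72, F.gif + 80⟩ : Span)] mem mem')
    (hlz : LZOK mem F.pv) : LZOK mem' F.pv := by
  have hp := hgo.owns.placed hok
  have G := carry_Geo.intro hgo.shape hp hok hcur
  obtain ⟨xg, hxg, ebg, hcg⟩ := G.gifObj
  obtain ⟨xp, hxp, ebp, hcp⟩ := G.pvObj
  have hpr := hok.obj_range hxp
  have hpi := hok.obj_inside hxp
  have hpn := hok.next_above hxp
  have hgp := G.far xg xp hxg hxp (by
    rw [ebg, ebp]
    exact G.gif_ne_pv)
  have hsv := hgo.shape.saved
  rw [hsome] at hsv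
  have harr : (sv.arr, 56 * sv.imgs.length) ∈ F.structs := by
    apply carry_mem_structs_saved
    rw [hsome]
    exact List.mem_cons_self
  have hap := G.far _ xp hlc hxp (by
    rw [ebp]
    exact (G.struct_ne _ harr).2)
  simp only at hap
  apply hlz.sameExcept hs (by omega)
  intro w hw
  simp only [List.mem_cons, List.not_mem_nil, or_false] at hw
  rcases hw with rfl | rfl | rfl | rfl | rfl | rfl | rfl | rfl
  · left
    show top - 40 ≤ F.pv + 8
    omega
  · left
    show 0x800008 ≤ F.pv + 8
    omega
  · right
    show F.pv + 48 ≤ H.next - 32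
    omega
  · right
    unfold shadowSpan
    show F.pv + 48 ≤ 0xC00000 + H.next / 8
    omega
  · right
    show F.pv + 48 ≤ H.next
    omega
  · show sv.arr - 16 ≤ F.pv + 8 ∨ F.pv + 48 ≤ sv.arr - 32
    omega
  · right
    unfold shadowSpan
    show F.pv + 48 ≤ 0xC00000 + sv.arr / 8
    omega
  · show F.gif + 80 ≤ F.pv + 8 ∨ F.pv + 48 ≤ F.gif + 72
    omega

/-- **WHAT IS OWNED AFTER THE ARRAY GREW IN PLACE** (`Owns.resize_head` under the permutation `Forest.owned_saved`). -/
theorem seg2_owns_inplace {H : Heap} {F : Forest} {sv : Saved} (h : Owns H F.owned) (hsome : F.saved = some sv) :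
    Owns (H.resize sv.arr ((sv.imgs.length + 1) * 56))
      ({ F with saved := some { sv with arr := sv.arr, cap := sv.imgs.length + 1 } } : Forest).owned := by
  have e : (sv.imgs.length + 1) * 56 = 56 * (sv.imgs.length + 1) := Nat.mul_comm _ _
  rw [e]
  have h1 := h.perm (Forest.owned_saved F)
  rw [hsome, Saved.objs_some] at h1
  have h2 : Owns (H.resize sv.arr (56 * (sv.imgs.length + 1)))
      ((sv.arr, 56 * (sv.imgs.length + 1)) :: (sv.imgs.flatMap Img.objs ++ F.ownedButSaved)) :=
    Owns.resize_head (objs := sv.imgs.flatMap Img.objs ++ F.ownedButSaved) h1 _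
  have hperm := Forest.owned_saved
    ({ F with saved := some { sv with arr := sv.arr, cap := sv.imgs.length + 1 } } : Forest)
  exact h2.perm hperm.symm

/-- **WHAT IS OWNED AFTER THE ARRAY MOVED** (`Owns.push_cons`, then `Owns.release` of the old array). -/
theorem seg2_owns_moved {H : Heap} {F : Forest} {sv : Saved} {mem : Mem} (h : Owns H F.owned) (hok : HeapOK H mem)
    (hsome : F.saved = some sv) (c' : Nat) :
    Owns ((H.push ((sv.imgs.length + 1) * 56) c').release sv.arr)
      ({ F with saved := some { sv with arr := H.next, cap := sv.imgs.length + 1 } } : Forest).owned := by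
  have e : (sv.imgs.length + 1) * 56 = 56 * (sv.imgs.length + 1) := Nat.mul_comm _ _
  rw [e]
  have h1 := h.perm (Forest.owned_saved F)
  rw [hsome, Saved.objs_some] at h1
  have h2 : Owns (H.push (56 * (sv.imgs.length + 1)) c')
      ((H.next, 56 * (sv.imgs.length + 1)) :: (sv.arr, 56 * sv.cap) :: (sv.imgs.flatMap Img.objs ++ F.ownedButSaved)) :=
    Owns.push_cons (objs := (sv.arr, 56 * sv.cap) :: (sv.imgs.flatMap Img.objs ++ F.ownedButSaved)) h1 hok _ _
  have h3 : Owns ((H.push (56 * (sv.imgs.length + 1)) c').release sv.arr)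
      ((H.next, 56 * (sv.imgs.length + 1)) :: (sv.imgs.flatMap Img.objs ++ F.ownedButSaved)) :=
    h2.release (p := sv.arr) (n := 56 * sv.cap) (List.Perm.swap _ _ _)
  have hperm := Forest.owned_saved
    ({ F with saved := some { sv with arr := H.next, cap := sv.imgs.length + 1 } } : Forest)
  exact h3.perm hperm.symm

/-- **1094B5H … 1095E6H, the forest has no array** (dgif_lib.c:444 `if (GifFile->SavedImages)` is false): the checked load of
`gif.SavedImages` gives 0, `je` is taken: `NoArray`. -/
theorem seg2_none (Lay : Layout) (hLay : Lay.hi = 0x1000000) (μ : Microarch) (hμ : UserX.MicroOK μ) (u₀ : State)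
    (hcode : HasCodeNat Lay u₀ Gif.L.DGifGetImageDesc.entry Gif.Code.code_DGifGetImageDesc.nat Gif.L.DGifGetImageDesc.size)
    (h_load8 : Asan.SmallCheck Lay μ ProgX.Base.WayInv (ProgX.Base.CodeOK u₀) [.rax, .rcx, .rdx] 8
      ProgX.Base.L.__asan_load8_noabort.entry)
    (H : Heap) (rest : List Obj) (frames : List (Nat × FrameLayout)) (F : Forest) (R : Rd) (e : State) (ret : Word)
    (Hc : Heap) (Fc : Forest) (v : State)
    (hmid : DGifGetImageDesc.Mid Gif.L.DGifGetImageDesc.at_1094b5 H rest frames F R Hc Fc u₀ e ret v)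
    (hnone : Fc.saved = none) :
    ReachVia Lay μ ProgX.Base.WayInv v (DGifGetImageDesc.NoArray H rest frames F R Hc Fc u₀ e ret) := by
  obtain ⟨hat, himgs, hlz⟩ := hmid
  have he := hat.entry
  v_entry he
  obtain ⟨henv, hrdi⟩ := hat.pre
  have w_rip := hat.rip
  have c_rsp : v.reg .rsp = e.reg .rsp - 40 := hat.rsp
  have c_rbx : v.reg .rbx = e.reg .rdi := hat.rbx
  have w_kept : RegsKept [.rsp] v v := RegsKept.refl _ _
  have w_eq : Mem.EqOn ProgX.Base.L.textLo ProgX.Base.L.textHi u₀.mem v.mem := ProgX.Base.conv_code_eqOn hat.code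
  have hdf := (show abiInv _ from hat.abi).1
  have hmx := (show abiInv _ from hat.abi).2
  have hsse := ProgX.Base.sseOK_of_abiInv hat.abi
  have hcur := henv.ctx.cursor_range henv.heap.inv.shadow
  have hbase : Hc.base = 0x800000 := hat.region.1.trans henv.heap.base
  have hgif : Fc.gif = F.gif := hat.forest.1
  have hgin := hat.ok.owns.inside hat.inv.heap (o := (Fc.gif, 120)) List.mem_cons_self
  simp only at hgin
  rw [hbase, hgif] at hgin
  have hgin1 := hgin.1
  have hgin2 := hgin.2.2.2.2
  clear hgin
  -- the field: `gif.SavedImages = 0`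
  have hsv := hat.ok.shape.saved
  rw [hnone] at hsv
  have hp0 : GifFileType.SavedImages v.mem Fc.gif = 0 := hsv.1
  simp only [gfield] at hp0
  rw [hgif] at hp0
  have l_saved : v.mem.readLE (e.reg .rdi + 0x48) 8 = 0 := by
    rw [rd_eq_readLE v.mem _ (F.gif + 72) 8 (by u_omega)]
    exact hp0
  u_walk hcode [hμ.vendor] until [Gif.L.DGifGetImageDesc.at_1095e6] span [ProgX.Base.L.textLo, ProgX.Base.L.textHi] side (v_side)
  case check_1094b9 =>
    -- dgif_lib.c:444 the load of `gif.SavedImages`: 8 bytes inside gif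
    clear he_align
    have hun : ShadowUntouched v.mem s_1094b9.mem := by v_untouched
    have hgl : LiveIn (Hc.liveObjs ++ rest) frames Fc.gif 120 :=
      hat.ok.gif_live.liveIn rest _ (Nat.le_refl _) (Nat.le_refl _)
    rw [hgif] at hgl
    exact hgl.accSmall hat.inv.shadow hun _ 8 (by decide) (by u_omega) (by u_omega)
  -- 0x1095e6: only the check call's return address was stored
  clear he_align
  obtain ⟨hinvA, hokA, hremA⟩ := store_stack hat.inv hat.ok ⟨hcur.1, hcur.2.1⟩ (e.reg .rsp - 48) 8 1086654
    (by u_omega) (by u_omega)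
  rw [← w_mem] at hinvA hokA
  have hs : Mem.SameExcept [⟨(e.reg .rsp).toNat - 48, (e.reg .rsp).toNat - 40⟩] v.mem s_1094c5.mem := by
    rw [w_mem]
    u_same
  have habi : (conv u₀).inv s_1094c5 := by
    refine ProgX.Base.abiInv_of ?_ ?_
    · rw [w_flags, X86.User.df_setStatus]
      exact w_df_1094b9
    · rw [w_mxcsr]
      exact hmx
  have hat1 : DGifGetImageDesc.At Gif.L.DGifGetImageDesc.at_1095e6 H rest frames F R Hc Fc u₀ e ret s_1094c5 := by
    refine seg2_carry Lay hLay hat hs ?_ w_rip w_rsp (w_kept.get .rbx rfl) (w_kept.get .r14 rfl) (w_kept.get .r15 rfl)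
      hinvA hat.region hat.forest hokA (ProgX.Base.conv_code_in w_eq) habi
    intro w hw
    rw [List.mem_singleton.mp hw]
    left
    simp only
    omega
  have hpv : Fc.pv = F.pv := hat.forest.2.1
  have hpin := hat.ok.owns.inside hat.inv.heap (o := (Fc.pv, 24936)) (List.mem_cons_of_mem _ List.mem_cons_self)
  simp only at hpin
  rw [hbase, hpv] at hpin
  have hpin1 := hpin.1
  have hpin2 := hpin.2.2.2.2
  clear hpin
  have hlz1 : LZOK s_1094c5.mem F.pv := by
    apply hlz.sameExcept hs (by omega)
    intro w hw
    rw [List.mem_singleton.mp hw]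
    left
    simp only
    omega
  exact ReachVia.done ⟨⟨hat1, himgs, hlz1⟩, hnone⟩

/-- **`lea esi, [rax+1] ; movsxd rsi, esi`** of `eax = n` (a dword load), `n + 1` an `int`: the number `n + 1`. -/
theorem seg2_rsi (n : Nat) (h : n + 1 < 2 ^ 31) :
    Word.ofBV (BitVec.signExtend 64 (BitVec.setWidth 32 (Word.ofBV (BitVec.ofNat 32 n) + 1).toBitVec)) =
      UInt64.ofNat (n + 1) := by
  have e1 : (Word.ofBV (BitVec.ofNat 32 n)).toNat = n := toNat_ofBV_ofNat32 n (by omega)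
  have e2 := lea32_succ (Word.ofBV (BitVec.ofNat 32 n)) (by omega)
  rw [toNat_ofBV32, e1] at e2
  rw [sext32_bv _ (by omega), e2]

/-- **At 1094EAH (ret7), `openbsd_reallocarray(SavedImages, ImageCount + 1, 56)` has returned** (dgif_lib.c:445). `v` is the state
at the segment's entry (1094B5H, `Mid`), `w` the state now; the forest's array is `sv`, of capacity `c` in the heap; `rax` is the
result, and the three outcomes of `ReallocPost` are stated over `v.mem` and `w.mem` (the callee's entry memory differs from `v.mem`
by the pushed return addresses only). The heap's and the state invariant are NOT restated: the tail of the segment derives them per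
outcome. -/
structure seg2_AtRet7 (H : Heap) (rest : List Obj) (frames : List (Nat × FrameLayout)) (F : Forest) (R : Rd)
    (Hc : Heap) (Fc : Forest) (u₀ e : State) (ret : Word) (sv : Saved) (c : Nat) (v w : State) : Prop where
  /-- the segment's entry assertion -/
  mid : DGifGetImageDesc.Mid Gif.L.DGifGetImageDesc.at_1094b5 H rest frames F R Hc Fc u₀ e ret v
  /-- the array of the forest, and its capacity in the heap -/
  saved : Fc.saved = some sv
  cap : Hc.LiveCap sv.arr (56 * sv.cap) c
  rip : w.rip = Gif.L.DGifGetImageDesc.ret7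
  rsp : w.reg .rsp = e.reg .rsp - 40
  rbx : w.reg .rbx = v.reg .rbx
  r14 : w.reg .r14 = v.reg .r14
  r15 : w.reg .r15 = v.reg .r15
  code : (conv u₀).code.In w.mem
  abi : (conv u₀).inv w
  /-- what was written since `v`: stack below the body's stack pointer, and the callee's windows -/
  same : Mem.SameExcept
    [⟨(e.reg .rsp).toNat - 496, (e.reg .rsp).toNat - 40⟩,
     ⟨0x800000, 0x800008⟩,
     ⟨Hc.next - 32, Hc.next - 8⟩,
     shadowSpan Hc.next (Hc.next + (sv.imgs.length + 1) * 56),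
     ⟨Hc.next, Hc.next + (sv.imgs.length + 1) * 56⟩,
     ⟨sv.arr - 32, sv.arr - 16⟩,
     shadowSpan sv.arr (sv.arr + c)] v.mem w.mem
  /-- IN PLACE -/
  inplace : r16 ((sv.imgs.length + 1) * 56) ≤ c →
    (w.reg .rax).toNat = sv.arr ∧
    HeapInv (Hc.resize sv.arr ((sv.imgs.length + 1) * 56)) rest frames ((e.reg .rsp).toNat - 40) w.mem ∧
    Mem.EqOn sv.arr (sv.arr + c) v.mem w.mem
  /-- MOVED -/
  moved : c < r16 ((sv.imgs.length + 1) * 56) → Hc.Fits (r16 ((sv.imgs.length + 1) * 56)) →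
    (w.reg .rax).toNat = Hc.next ∧
    HeapInv ((Hc.push ((sv.imgs.length + 1) * 56) (Hc.moveCap ((sv.imgs.length + 1) * 56))).release sv.arr) rest frames
      ((e.reg .rsp).toNat - 40) w.mem ∧
    ∀ i, i < 56 * sv.cap → w.mem.readLE (UInt64.ofNat (Hc.next + i)) 1 = v.mem.readLE (UInt64.ofNat (sv.arr + i)) 1
  /-- FAILED -/
  failed : c < r16 ((sv.imgs.length + 1) * 56) → ¬ Hc.Fits (r16 ((sv.imgs.length + 1) * 56)) →
    w.reg .rax = 0 ∧
    HeapInv Hc rest frames ((e.reg .rsp).toNat - 40) w.mem ∧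
    ShadowUntouched v.mem w.mem ∧
    Mem.SameExcept [⟨(e.reg .rsp).toNat - 496, (e.reg .rsp).toNat - 40⟩] v.mem w.mem

/-- **1094B5H … the call of openbsd_reallocarray … 1094EAH (ret7), the forest has the array `sv`** (dgif_lib.c:444-446): the checked
load of `gif.SavedImages` (`= sv.arr ≠ 0`: `je` not taken), the checked load of `ImageCount` (`= length`), `rsi = length + 1`,
`rdx = 56`, `rdi = sv.arr`, the call. -/
theorem seg2_call (Lay : Layout) (hLay : Lay.hi = 0x1000000) (μ : Microarch) (hμ : UserX.MicroOK μ) (u₀ : State)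
    (hcode : HasCodeNat Lay u₀ Gif.L.DGifGetImageDesc.entry Gif.Code.code_DGifGetImageDesc.nat Gif.L.DGifGetImageDesc.size)
    (h_load8 : Asan.SmallCheck Lay μ ProgX.Base.WayInv (ProgX.Base.CodeOK u₀) [.rax, .rcx, .rdx] 8
      ProgX.Base.L.__asan_load8_noabort.entry)
    (h_load4 : Asan.SmallCheck Lay μ ProgX.Base.WayInv (ProgX.Base.CodeOK u₀) [.rax, .rcx, .rdx] 4
      ProgX.Base.L.__asan_load4_noabort.entry)
    (H : Heap) (rest : List Obj) (frames : List (Nat × FrameLayout)) (F : Forest) (R : Rd) (e : State) (ret : Word)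
    (Hc : Heap) (Fc : Forest) (v : State) (sv : Saved) (c : Nat)
    (h_ra : Calls Lay μ ProgX.Base.WayInv (ProgX.Base.conv u₀) Gif.L.openbsd_reallocarray.entry
      (Gif.Spec.openbsd_reallocarray.spec Hc rest frames (56 * sv.cap) c))
    (hmid : DGifGetImageDesc.Mid Gif.L.DGifGetImageDesc.at_1094b5 H rest frames F R Hc Fc u₀ e ret v)
    (hsome : Fc.saved = some sv) (hlc : Hc.LiveCap sv.arr (56 * sv.cap) c) :
    ReachVia Lay μ ProgX.Base.WayInv v (seg2_AtRet7 H rest frames F R Hc Fc u₀ e ret sv c v) := by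
  have hmid0 := hmid
  obtain ⟨hat, himgs, hlz⟩ := hmid
  have he := hat.entry
  v_entry he
  obtain ⟨henv, hrdi⟩ := hat.pre
  have w_rip := hat.rip
  have c_rsp : v.reg .rsp = e.reg .rsp - 40 := hat.rsp
  have c_rbx : v.reg .rbx = e.reg .rdi := hat.rbx
  have w_kept : RegsKept [.rsp] v v := RegsKept.refl _ _
  have w_eq : Mem.EqOn ProgX.Base.L.textLo ProgX.Base.L.textHi u₀.mem v.mem := ProgX.Base.conv_code_eqOn hat.code
  have hdf := (show abiInv _ from hat.abi).1
  have hmx := (show abiInv _ from hat.abi).2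
  have hsse := ProgX.Base.sseOK_of_abiInv hat.abi
  have hcur := henv.ctx.cursor_range henv.heap.inv.shadow
  have hbase : Hc.base = 0x800000 := hat.region.1.trans henv.heap.base
  have hlimit : Hc.limit = 0xC00000 := hat.region.2.trans henv.heap.limit
  have hgif : Fc.gif = F.gif := hat.forest.1
  have hgin := hat.ok.owns.inside hat.inv.heap (o := (Fc.gif, 120)) List.mem_cons_self
  simp only at hgin
  rw [hbase, hgif] at hgin
  have hgin1 := hgin.1
  have hgin2 := hgin.2.2.2.2
  clear hgin
  -- the array: where it is
  have hain := hat.ok.owns.inside hat.inv.heap (o := (sv.arr, 56 * sv.cap))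
    (Forest.mem_owned_saved (by rw [hsome]; exact List.mem_cons_self))
  simp only at hain
  rw [hbase] at hain
  have hain1 := hain.1
  have hain2 := hain.2.2.2.2
  clear hain
  have hcin := hat.inv.heap.obj_inside hlc
  simp only at hcin
  have hcin2 := hcin.2.2.2
  clear hcin
  have hroom := hat.inv.heap.room
  have hnext := Heap.next_def Hc
  rw [hbase] at hnext
  rw [hbase, hlimit] at hroom
  -- the two fields the segment loads
  have hsv := hat.ok.shape.saved
  rw [hsome] at hsv
  obtain ⟨hp, hcnt, hlen, hcap1, hslots⟩ := hsv
  simp only [gfield] at hp hcnt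
  rw [hgif] at hp hcnt
  have l_saved : v.mem.readLE (e.reg .rdi + 0x48) 8 = sv.arr := by
    rw [rd_eq_readLE v.mem _ (F.gif + 72) 8 (by u_omega)]
    exact hp
  have l_count : v.mem.readLE (e.reg .rdi + 0x20) 4 = sv.imgs.length := by
    rw [rd_eq_readLE v.mem _ (F.gif + 32) 4 (by u_omega)]
    exact hcnt
  have hgl : LiveIn (Hc.liveObjs ++ rest) frames F.gif 120 := by
    rw [← hgif]
    exact hat.ok.gif_live.liveIn rest _ (Nat.le_refl _) (Nat.le_refl _)
  u_walk hcode [hμ.vendor] until [Gif.L.DGifGetImageDesc.ret7] span [ProgX.Base.L.textLo, ProgX.Base.L.textHi] side (v_side)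
  case check_1094b9 =>
    -- dgif_lib.c:444 the load of `gif.SavedImages`: 8 bytes inside gif
    clear he_align
    have hun : ShadowUntouched v.mem s_1094b9.mem := by v_untouched
    exact hgl.accSmall hat.inv.shadow hun _ 8 (by decide) (by u_omega) (by u_omega)
  case check_1094cf =>
    -- dgif_lib.c:446 the load of `gif.ImageCount`: 4 bytes inside gif
    clear he_align
    have hun : ShadowUntouched v.mem s_1094cf.mem := by v_untouched
    exact hgl.accSmall hat.inv.shadow hun _ 4 (by decide) (by u_omega) (by u_omega)
  case call_inv =>
    refine ProgX.Base.abiInv_of ?_ ?_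
    · rw [w_flags]
      exact w_df_1094cf
    · rw [w_mxcsr]
      exact hmx
  case pre_1094e5 =>
    -- REALLOCARRAY'S PRECONDITION: only a return address was pushed since `v`
    have hinv1 : HeapInv Hc rest frames ((s_1094e5.reg .rsp).toNat + 8) s_1094e5.mem := by
      have e_top : (s_1094e5.reg .rsp).toNat + 8 = (e.reg .rsp).toNat - 40 := by
        rw [w_rsp]
        u_omega
      rw [e_top, w_mem]
      exact hat.inv.writeLE_out _ 8 _ (by u_omega) (Or.inl (by u_omega)) (Or.inl (by u_omega))
    refine ⟨⟨hinv1, hbase, hlimit, henv.heap.text, henv.heap.offText⟩, ?_, ?_, ?_, ?_, Or.inr ?_⟩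
    · rw [w_rsi, seg2_rsi _ (by omega)]
      u_omega
    · rw [w_rsi, seg2_rsi _ (by omega)]
      u_omega
    · rw [w_rdx]
      decide
    · rw [w_rdx]
      decide
    · rw [w_rdi, toNat_ofNat_addr sv.arr (by omega)]
      exact hlc
  -- 0x1094ea (ret7): REALLOCARRAY HAS RETURNED
  clear he_align
  have e_rsi : (s_1094e5.reg .rsi).toNat = sv.imgs.length + 1 := by
    rw [w_rsi_1094e5, seg2_rsi _ (by omega)]
    u_omega
  have e_rdx : (s_1094e5.reg .rdx).toNat = 56 := by
    rw [w_rdx_1094e5]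
    decide
  have e_rdi : (s_1094e5.reg .rdi).toNat = sv.arr := by
    rw [w_rdi_1094e5, toNat_ofNat_addr sv.arr (by omega)]
  have e_top : (s_1094e5.reg .rsp).toNat + 8 = (e.reg .rsp).toNat - 40 := by
    rw [w_rsp_1094e5]
    u_omega
  have hpost : ReallocPost Hc rest frames 144 (s_1094e5.reg .rdi).toNat (56 * sv.cap) c
      ((s_1094e5.reg .rsi).toNat * (s_1094e5.reg .rdx).toNat) s_1094e5 s_1094e5r := by
    apply w_post.2
    rw [e_rdi]
    omega
  rw [e_rsi, e_rdx, e_rdi] at hpost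
  v_after_call w_rsp_1094e5 w_mem_1094e5
  rw [e_rsi, e_rdx, e_rdi] at w_same
  simp only [shadowSpan] at w_same
  have hsame1 : Mem.SameExcept
    [⟨(e.reg .rsp).toNat - 496, (e.reg .rsp).toNat - 40⟩,
     ⟨0x800000, 0x800008⟩,
     ⟨Hc.next - 32, Hc.next - 8⟩,
     shadowSpan Hc.next (Hc.next + (sv.imgs.length + 1) * 56),
     ⟨Hc.next, Hc.next + (sv.imgs.length + 1) * 56⟩,
     ⟨sv.arr - 32, sv.arr - 16⟩,
     shadowSpan sv.arr (sv.arr + c)] v.mem s_1094e5r.mem := by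
    simp only [shadowSpan]
    u_same
  obtain ⟨hin, hmv, hfl⟩ := hpost
  refine ReachVia.done ?_
  refine {
    mid := hmid0
    saved := hsome
    cap := hlc
    rip := w_rip
    rsp := w_rsp
    rbx := w_kept.get .rbx rfl
    r14 := w_kept.get .r14 rfl
    r15 := w_kept.get .r15 rfl
    code := w_code
    abi := w_inv
    same := hsame1
    inplace := ?_
    moved := ?_
    failed := ?_
  }
  · -- IN PLACE
    intro hfit
    obtain ⟨a1, a2, a3⟩ := hin hfit
    refine ⟨a1, ?_, ?_⟩
    · rw [← e_top]
      exact a2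
    · rw [w_mem_1094e5] at a3
      exact (Mem.EqOn.writeLE sv.arr (sv.arr + c) v.mem (e.reg .rsp - 48) 8 _ (by u_omega) (Or.inl (by u_omega))).trans a3
  · -- MOVED
    intro hbig hfit
    obtain ⟨a1, a2, a3⟩ := hmv hbig hfit
    refine ⟨a1, ?_, ?_⟩
    · rw [← e_top]
      exact a2
    · intro i hi
      rw [a3 i hi, w_mem_1094e5]
      have ea : (UInt64.ofNat (sv.arr + i)).toNat = sv.arr + i := toNat_ofNat_addr _ (by omega)
      exact ((Mem.EqOn.writeLE (sv.arr + i) (sv.arr + i + 1) v.mem (e.reg .rsp - 48) 8 _ (by u_omega)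
        (Or.inl (by u_omega))).readLE (UInt64.ofNat (sv.arr + i)) 1 (by omega) (by omega) (by omega))
  · -- FAILED
    intro hbig hfit
    obtain ⟨a1, a2, a3, a4⟩ := hfl hbig hfit
    clear w_same
    have w_same := a4
    rw [w_rsp_1094e5, w_mem_1094e5] at w_same
    refine ⟨a1, ?_, ?_, ?_⟩
    · rw [← e_top]
      exact a2
    · v_untouched
    · u_same

/-- **1094EAH (ret7) … 109503H, the array grew** (dgif_lib.c:448, 452): `rax = q ≠ 0` (`q = sv.arr` in place, `q = Hc.next` moved),
`je` not taken, the checked store of `q` to `gif.SavedImages`. `Hc'` is the heap after the call; what differs between the two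
outcomes is given as hypotheses: the heap's invariant at `w`, what is owned, where `q` is, and that the counted slots at `q`
hold the bytes of the old ones. -/
theorem seg2_tail_grow (Lay : Layout) (hLay : Lay.hi = 0x1000000) (μ : Microarch) (hμ : UserX.MicroOK μ) (u₀ : State)
    (hcode : HasCodeNat Lay u₀ Gif.L.DGifGetImageDesc.entry Gif.Code.code_DGifGetImageDesc.nat Gif.L.DGifGetImageDesc.size)
    (h_store8 : Asan.SmallCheck Lay μ ProgX.Base.WayInv (ProgX.Base.CodeOK u₀) [.rax, .rcx, .rdx] 8
      ProgX.Base.L.__asan_store8_noabort.entry)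
    (H : Heap) (rest : List Obj) (frames : List (Nat × FrameLayout)) (F : Forest) (R : Rd) (e : State) (ret : Word)
    (Hc : Heap) (Fc : Forest) (sv : Saved) (c : Nat) (v w : State) (Hc' : Heap) (q : Nat)
    (hat7 : seg2_AtRet7 H rest frames F R Hc Fc u₀ e ret sv c v w)
    (hrax : (w.reg .rax).toNat = q) (hq1 : 0x800040 ≤ q) (hq2 : q + (sv.imgs.length + 1) * 56 + 32 ≤ 0xC00000)
    (hqg : q + 56 * sv.imgs.length ≤ F.gif ∨ F.gif + 120 ≤ q)
    (hinv' : HeapInv Hc' rest frames ((e.reg .rsp).toNat - 40) w.mem) (hreg' : SameRegion Hc Hc')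
    (howns : Owns Hc' ({ Fc with saved := some { sv with arr := q, cap := sv.imgs.length + 1 } } : Forest).owned)
    (hcopy : ∀ i, i < 56 * sv.imgs.length →
      w.mem.readLE (UInt64.ofNat (q + i)) 1 = v.mem.readLE (UInt64.ofNat (sv.arr + i)) 1) :
    ReachVia Lay μ ProgX.Base.WayInv w (fun x => DGifGetImageDesc.Grown H rest frames F R Hc'
      ({ Fc with saved := some { sv with arr := q, cap := sv.imgs.length + 1 } } : Forest) u₀ e ret x) := by
  obtain ⟨hat, himgs, hlz⟩ := hat7.mid
  have hsome := hat7.saved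
  have hlc := hat7.cap
  have he := hat.entry
  v_entry he
  obtain ⟨henv, hrdi⟩ := hat.pre
  have w_rip := hat7.rip
  have c_rsp : w.reg .rsp = e.reg .rsp - 40 := hat7.rsp
  have c_rbx : w.reg .rbx = e.reg .rdi := hat7.rbx.trans hat.rbx
  have c_rax : w.reg .rax = UInt64.ofNat q := by
    rw [← hrax, UInt64.ofNat_toNat]
  have w_kept : RegsKept [.rsp] w w := RegsKept.refl _ _
  have w_eq : Mem.EqOn ProgX.Base.L.textLo ProgX.Base.L.textHi u₀.mem w.mem := ProgX.Base.conv_code_eqOn hat7.code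
  have hdf := (show abiInv _ from hat7.abi).1
  have hmx := (show abiInv _ from hat7.abi).2
  have hsse := ProgX.Base.sseOK_of_abiInv hat7.abi
  have hcur := henv.ctx.cursor_range henv.heap.inv.shadow
  have hbase : Hc.base = 0x800000 := hat.region.1.trans henv.heap.base
  have hlimit : Hc.limit = 0xC00000 := hat.region.2.trans henv.heap.limit
  have hbase' : Hc'.base = 0x800000 := hreg'.1.trans hbase
  have hgif : Fc.gif = F.gif := hat.forest.1
  have hgin := hat.ok.owns.inside hat.inv.heap (o := (Fc.gif, 120)) List.mem_cons_self
  simp only at hgin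
  rw [hbase, hgif] at hgin
  have hgin1 := hgin.1
  have hgin2 := hgin.2.2.2.2
  clear hgin
  have hcin := hat.inv.heap.obj_inside hlc
  simp only at hcin
  have hcin2 := hcin.2.2.2
  clear hcin
  have hain := hat.inv.heap.obj_range hlc
  simp only at hain
  rw [hbase] at hain
  have hain1 := hain.1
  clear hain
  have hroom := hat.inv.heap.room
  have hnext := Heap.next_def Hc
  rw [hbase] at hnext
  rw [hbase, hlimit] at hroom
  -- gif is live in the new heap
  have hglive : Hc'.Live F.gif 120 := by
    rw [← hgif]
    exact howns.live (Fc.gif, 120) List.mem_cons_self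
  have hgl : LiveIn (Hc'.liveObjs ++ rest) frames F.gif 120 := hglive.liveIn rest _ (Nat.le_refl _) (Nat.le_refl _)
  have hsame7 := hat7.same
  simp only [shadowSpan] at hsame7
  u_walk hcode [hμ.vendor] until [Gif.L.DGifGetImageDesc.at_109503] span [ProgX.Base.L.textLo, ProgX.Base.L.textHi] side (v_side)
  case check_1094fa =>
    -- dgif_lib.c:452 the store of `gif.SavedImages`: 8 bytes inside gif
    clear he_align
    have hun : ShadowUntouched w.mem s_1094fa.mem := by v_untouched
    exact hgl.accSmall hinv'.shadow hun _ 8 (by decide) (by u_omega) (by u_omega)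
  -- 0x109503: the return address of the check and the field `gif.SavedImages` were stored
  clear he_align
  have eq : (UInt64.ofNat q).toNat = q := toNat_ofNat_addr q (by omega)
  rw [eq] at w_mem
  -- the footprint since `v`
  have hs8 : Mem.SameExcept [⟨(e.reg .rsp).toNat - 496, (e.reg .rsp).toNat - 40⟩, ⟨0x800000, 0x800008⟩,
      ⟨Hc.next - 32, Hc.next - 8⟩, shadowSpan Hc.next (Hc.next + (sv.imgs.length + 1) * 56),
      ⟨Hc.next, Hc.next + (sv.imgs.length + 1) * 56⟩, ⟨sv.arr - 32, sv.arr - 16⟩, shadowSpan sv.arr (sv.arr + c),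
      (⟨Fc.gif + 72, Fc.gif + 80⟩ : Span)] v.mem s_1094ff.mem := by
    simp only [shadowSpan]
    rw [w_mem, hgif]
    u_same
  -- the field holds `q`
  have hq : GifFileType.SavedImages s_1094ff.mem Fc.gif = q := by
    simp only [gfield]
    rw [hgif, w_mem, rd_writeLE_same _ _ 8 _ (F.gif + 72) (by u_omega) (by decide)]
    omega
  -- the counted slots at `q` hold the old bytes: the two stores are elsewhere
  have hcopy' : ∀ i, i < 56 * sv.imgs.length → rd s_1094ff.mem (q + i) 1 = rd v.mem (sv.arr + i) 1 := by
    intro i hi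
    rw [w_mem]
    rw [rd_writeLE_disjoint _ _ _ _ _ _ (by u_omega) (by omega) (by u_omega)]
    rw [rd_writeLE_disjoint _ _ _ _ _ _ (by u_omega) (by omega) (by u_omega)]
    exact hcopy i hi
  have hshape := seg2_shape hat.ok hat.inv.heap hbase ⟨hcur.1, hcur.2.1⟩ (by omega) (by omega) hsome hlc hs8 hq
    (by omega) hcopy'
  have hlz1 : LZOK s_1094ff.mem Fc.pv := by
    apply seg2_lz hat.ok hat.inv.heap hbase ⟨hcur.1, hcur.2.1⟩ (by omega) hsome hlc hs8
    rw [hat.forest.2.1]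
    exact hlz
  rw [hat.forest.2.1] at hlz1
  -- the heap's invariant through the two stores
  have hinv1 : HeapInv Hc' rest frames ((e.reg .rsp).toNat - 40) s_1094ff.mem := by
    rw [w_mem]
    apply HeapInv.writeLE_live _ hglive _ 8 _ (by u_omega) (by u_omega)
    exact hinv'.writeLE_out _ 8 _ (by u_omega) (Or.inl (by u_omega)) (Or.inl (by u_omega))
  have habi : (conv u₀).inv s_1094ff := by
    refine ProgX.Base.abiInv_of ?_ ?_
    · rw [w_flags]
      exact w_df_1094fa
    · rw [w_mxcsr]
      exact hmx
  have hat1 : DGifGetImageDesc.At Gif.L.DGifGetImageDesc.at_109503 H rest frames F R Hc'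
      ({ Fc with saved := some { sv with arr := q, cap := sv.imgs.length + 1 } } : Forest) u₀ e ret s_1094ff := by
    refine seg2_carry Lay hLay hat hs8 ?_ w_rip w_rsp ((w_kept.get .rbx rfl).trans hat7.rbx)
      ((w_kept.get .r14 rfl).trans hat7.r14) ((w_kept.get .r15 rfl).trans hat7.r15) hinv1
      (hat.region.trans hreg') ⟨hat.forest.1, hat.forest.2.1, hat.forest.2.2.1, hat.forest.2.2.2⟩ ⟨howns, hshape⟩
      (ProgX.Base.conv_code_in w_eq) habi
    intro x hx
    simp only [shadowSpan, List.mem_cons, List.not_mem_nil, or_false] at hx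
    rcases hx with rfl | rfl | rfl | rfl | rfl | rfl | rfl | rfl
    · left
      exact ⟨Nat.le_refl _, Nat.le_refl _⟩
    all_goals right
    all_goals simp only
    all_goals omega
  refine ReachVia.done ⟨⟨hat1, ?_, hlz1⟩, ⟨_, rfl, Nat.le_refl _⟩⟩
  rw [← himgs, Forest.imgs_some hsome]
  rfl

/-- **1094EAH (ret7) … 1095D1H … 10949AH, the array could not grow** (dgif_lib.c:448-450): `rax = 0` (`FailPost`: nothing but stack
was written), `je` taken, the checked store of `gif.Error = D_GIF_ERR_NOT_ENOUGH_MEM`, `ebp = 0`: `Done` with the same heap and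
forest. -/
theorem seg2_tail_fail (Lay : Layout) (hLay : Lay.hi = 0x1000000) (μ : Microarch) (hμ : UserX.MicroOK μ) (u₀ : State)
    (hcode : HasCodeNat Lay u₀ Gif.L.DGifGetImageDesc.entry Gif.Code.code_DGifGetImageDesc.nat Gif.L.DGifGetImageDesc.size)
    (h_store4 : Asan.SmallCheck Lay μ ProgX.Base.WayInv (ProgX.Base.CodeOK u₀) [.rax, .rcx, .rdx] 4
      ProgX.Base.L.__asan_store4_noabort.entry)
    (H : Heap) (rest : List Obj) (frames : List (Nat × FrameLayout)) (F : Forest) (R : Rd) (e : State) (ret : Word)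
    (Hc : Heap) (Fc : Forest) (sv : Saved) (c : Nat) (v w : State)
    (hat7 : seg2_AtRet7 H rest frames F R Hc Fc u₀ e ret sv c v w)
    (c_rax : w.reg .rax = 0)
    (hinvw : HeapInv Hc rest frames ((e.reg .rsp).toNat - 40) w.mem)
    (hstk : Mem.SameExcept [⟨(e.reg .rsp).toNat - 496, (e.reg .rsp).toNat - 40⟩] v.mem w.mem) :
    ReachVia Lay μ ProgX.Base.WayInv w (DGifGetImageDesc.Done H rest frames F R Hc Fc u₀ e ret) := by
  obtain ⟨hat, himgs, hlz⟩ := hat7.mid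
  have he := hat.entry
  v_entry he
  obtain ⟨henv, hrdi⟩ := hat.pre
  have w_rip := hat7.rip
  have c_rsp : w.reg .rsp = e.reg .rsp - 40 := hat7.rsp
  have c_rbx : w.reg .rbx = e.reg .rdi := hat7.rbx.trans hat.rbx
  have w_kept : RegsKept [.rsp] w w := RegsKept.refl _ _
  have w_eq : Mem.EqOn ProgX.Base.L.textLo ProgX.Base.L.textHi u₀.mem w.mem := ProgX.Base.conv_code_eqOn hat7.code
  have hdf := (show abiInv _ from hat7.abi).1
  have hmx := (show abiInv _ from hat7.abi).2
  have hsse := ProgX.Base.sseOK_of_abiInv hat7.abi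
  have hcur := henv.ctx.cursor_range henv.heap.inv.shadow
  have hbase : Hc.base = 0x800000 := hat.region.1.trans henv.heap.base
  have hgif : Fc.gif = F.gif := hat.forest.1
  have hgin := hat.ok.owns.inside hat.inv.heap (o := (Fc.gif, 120)) List.mem_cons_self
  simp only at hgin
  rw [hbase, hgif] at hgin
  have hgin1 := hgin.1
  have hgin2 := hgin.2.2.2.2
  clear hgin
  have hgl : LiveIn (Hc.liveObjs ++ rest) frames F.gif 120 := by
    rw [← hgif]
    exact hat.ok.gif_live.liveIn rest _ (Nat.le_refl _) (Nat.le_refl _)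
  u_walk hcode [hμ.vendor] until [Gif.L.DGifGetImageDesc.at_10949a] span [ProgX.Base.L.textLo, ProgX.Base.L.textHi] side (v_side)
  case check_1095d5 =>
    -- dgif_lib.c:449 the store of `gif.Error`: 4 bytes inside gif
    clear he_align
    have hun : ShadowUntouched w.mem s_1095d5.mem := by v_untouched
    exact hgl.accSmall hinvw.shadow hun _ 4 (by decide) (by u_omega) (by u_omega)
  -- 0x10949a: the return address of the check and `gif.Error` were stored
  clear he_align
  -- the state invariant at `w`: only stack was written since `v`
  have hokw : GifOK Hc Fc R w.mem := by
    apply hat.ok.sameExcept hat.inv.heap ⟨hcur.1, hcur.2.1⟩ hstk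
    intro x hx
    rw [List.mem_singleton.mp hx]
    apply Loose.stack hat.inv.heap
    · show 0x700000 ≤ (e.reg .rsp).toNat - 496
      omega
    · show (e.reg .rsp).toNat - 40 ≤ 0x800000
      omega
    · show (e.reg .rsp).toNat - 40 ≤ R.cur
      omega
  obtain ⟨hinvA, hokA, hremA⟩ := store_stack hinvw hokw ⟨hcur.1, hcur.2.1⟩ (e.reg .rsp - 48) 8 1086938
    (by u_omega) (by u_omega)
  rw [← hgif] at hrdi
  obtain ⟨hinvB, hokB, hremB⟩ := store_gif hinvA hokA ⟨hcur.1, hcur.2.1⟩ hbase (e.reg .rdi + 96) 4 109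
    (Or.inr (Or.inr (by u_omega)))
  rw [hgif] at hrdi
  rw [← w_mem] at hinvB hokB
  have hs : Mem.SameExcept [⟨(e.reg .rsp).toNat - 496, (e.reg .rsp).toNat - 40⟩, ⟨F.gif + 96, F.gif + 100⟩]
      v.mem s_1095e1.mem := by
    rw [w_mem]
    u_same
  have habi : (conv u₀).inv s_1095e1 := by
    refine ProgX.Base.abiInv_of ?_ ?_
    · rw [w_flags]
      exact w_df_1095d5
    · rw [w_mxcsr]
      exact hmx
  have hat1 : DGifGetImageDesc.At Gif.L.DGifGetImageDesc.at_10949a H rest frames F R Hc Fc u₀ e ret s_1095e1 := by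
    refine seg2_carry Lay hLay hat hs ?_ w_rip w_rsp ((w_kept.get .rbx rfl).trans hat7.rbx)
      ((w_kept.get .r14 rfl).trans hat7.r14) ((w_kept.get .r15 rfl).trans hat7.r15) hinvB hat.region hat.forest hokB
      (ProgX.Base.conv_code_in w_eq) habi
    intro x hx
    simp only [List.mem_cons, List.not_mem_nil, or_false] at hx
    rcases hx with rfl | rfl
    · left
      exact ⟨Nat.le_refl _, Nat.le_refl _⟩
    · right
      simp only
      omega
  refine ReachVia.done ?_
  exact {
    at_ := hat1
    res := by
      right
      rw [w_rbp]
      decide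
    ok1 := by
      intro h1
      rw [w_rbp] at h1
      exact absurd h1 (by decide)
    ok0 := fun _ => himgs
  }

/-- **1094EAH (ret7) … the exits**: the three outcomes of `ReallocPost`, each with the tail lemma it needs. IN PLACE: the heap is
`Hc.resize sv.arr m`, `q = sv.arr`; MOVED: the heap is `(Hc.push m c').release sv.arr`, `q = Hc.next`; FAILED: the same heap and
forest, to the shared exit. -/
theorem seg2_tail (Lay : Layout) (hLay : Lay.hi = 0x1000000) (μ : Microarch) (hμ : UserX.MicroOK μ) (u₀ : State)
    (hcode : HasCodeNat Lay u₀ Gif.L.DGifGetImageDesc.entry Gif.Code.code_DGifGetImageDesc.nat Gif.L.DGifGetImageDesc.size)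
    (h_store8 : Asan.SmallCheck Lay μ ProgX.Base.WayInv (ProgX.Base.CodeOK u₀) [.rax, .rcx, .rdx] 8
      ProgX.Base.L.__asan_store8_noabort.entry)
    (h_store4 : Asan.SmallCheck Lay μ ProgX.Base.WayInv (ProgX.Base.CodeOK u₀) [.rax, .rcx, .rdx] 4
      ProgX.Base.L.__asan_store4_noabort.entry)
    (H : Heap) (rest : List Obj) (frames : List (Nat × FrameLayout)) (F : Forest) (R : Rd) (e : State) (ret : Word)
    (Hc : Heap) (Fc : Forest) (sv : Saved) (c : Nat) (v w : State)
    (hat7 : seg2_AtRet7 H rest frames F R Hc Fc u₀ e ret sv c v w) :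
    ReachVia Lay μ ProgX.Base.WayInv w (fun x =>
      (∃ (H' : Heap) (F' : Forest), DGifGetImageDesc.Grown H rest frames F R H' F' u₀ e ret x) ∨
      DGifGetImageDesc.NoArray H rest frames F R Hc Fc u₀ e ret x ∨
      DGifGetImageDesc.Done H rest frames F R Hc Fc u₀ e ret x) := by
  obtain ⟨hat, himgs, hlz⟩ := hat7.mid
  have hsome := hat7.saved
  have hlc := hat7.cap
  obtain ⟨henv, hrdi⟩ := hat.pre
  have hcur := henv.ctx.cursor_range henv.heap.inv.shadow
  have hok := hat.inv.heap
  have hbase : Hc.base = 0x800000 := hat.region.1.trans henv.heap.base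
  have hlimit : Hc.limit = 0xC00000 := hat.region.2.trans henv.heap.limit
  have hgif : Fc.gif = F.gif := hat.forest.1
  -- where gif and the array are
  have G := carry_Geo.intro hat.ok.shape (hat.ok.owns.placed hok) hok ⟨hcur.1, hcur.2.1⟩
  obtain ⟨xg, hxg, ebg, hcg⟩ := G.gifObj
  have hsv := hat.ok.shape.saved
  rw [hsome] at hsv
  have hlen := hsv.2.2.1
  have harr : (sv.arr, 56 * sv.imgs.length) ∈ Fc.structs := by
    apply carry_mem_structs_saved
    rw [hsome]
    exact List.mem_cons_self
  have hfar := G.far _ xg hlc hxg (by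
    rw [ebg]
    exact (G.struct_ne _ harr).1)
  simp only at hfar
  rw [ebg, hgif] at hfar
  have hgn := hok.next_above hxg
  rw [ebg, hgif] at hgn
  have har := hok.obj_range hlc
  have hai := hok.obj_inside hlc
  have hsc := hok.size_le_cap hlc
  simp only at har hai hsc
  rw [hbase] at har
  have hroom := hok.room
  have hnext := Heap.next_def Hc
  rw [hbase] at hnext
  rw [hbase, hlimit] at hroom
  have hm16 := le_r16 ((sv.imgs.length + 1) * 56)
  by_cases hfit : r16 ((sv.imgs.length + 1) * 56) ≤ c
  · -- IN PLACE
    obtain ⟨a1, a2, a3⟩ := hat7.inplace hfit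
    refine (seg2_tail_grow Lay hLay μ hμ u₀ hcode h_store8 H rest frames F R e ret Hc Fc sv c v w
      (Hc.resize sv.arr ((sv.imgs.length + 1) * 56)) sv.arr hat7 a1 (by omega) (by omega) (by omega) a2
      (SameRegion.resize Hc _ _) (seg2_owns_inplace hat.ok.owns hsome) ?_).trans ?_
    · intro i hi
      have ea : (UInt64.ofNat (sv.arr + i)).toNat = sv.arr + i := toNat_ofNat_addr _ (by omega)
      exact a3.readLE (UInt64.ofNat (sv.arr + i)) 1 (by omega) (by omega) (by omega)
    · intro x hx
      exact ReachVia.done (Or.inl ⟨_, _, hx⟩)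
  · by_cases hF : Hc.Fits (r16 ((sv.imgs.length + 1) * 56))
    · -- MOVED
      obtain ⟨a1, a2, a3⟩ := hat7.moved (by omega) hF
      have hF' := hF
      unfold Heap.Fits at hF'
      rw [hbase, hlimit] at hF'
      refine (seg2_tail_grow Lay hLay μ hμ u₀ hcode h_store8 H rest frames F R e ret Hc Fc sv c v w
        ((Hc.push ((sv.imgs.length + 1) * 56) (Hc.moveCap ((sv.imgs.length + 1) * 56))).release sv.arr) Hc.next hat7 a1
        (by omega) (by omega) (by omega) a2
        ((SameRegion.push Hc _ _).trans (SameRegion.release _ _))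
        (seg2_owns_moved hat.ok.owns hok hsome _) ?_).trans ?_
      · intro i hi
        exact a3 i (by omega)
      · intro x hx
        exact ReachVia.done (Or.inl ⟨_, _, hx⟩)
    · -- FAILED
      obtain ⟨a1, a2, a3, a4⟩ := hat7.failed (by omega) hF
      refine (seg2_tail_fail Lay hLay μ hμ u₀ hcode h_store4 H rest frames F R e ret Hc Fc sv c v w hat7 a1 a2 a4).trans ?_
      intro x hx
      exact ReachVia.done (Or.inr (Or.inr hx))

end Gif.Spec.DGifGetImageDesc_2
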